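-- pv_equiv track=rewrite | github.com/flying-dolphin/table-tennis-db | scripts/runtime/wtt_scrape_shared.py | text_value
-- ===== SOURCE A (Python) =====
-- def text_value(items: list[dict] | None) -> str | None:
--     for item in items or []:
--         if item.get("Language") == "ENG" and item.get("Value"):
--             return item["Value"]
--     for item in items or []:
--         if item.get("Value"):
--             return item["Value"]
--     return None
-- ===== SOURCE B (Python) =====
-- def text_value(items: list[dict] | None) -> str | None:
--     fallback = None
--     for item in items or []:
--         v = item.get("Value")
--         if v:
--             if item.get("Language") == "ENG":
--                 return v
--             if fallback is None:
--                 fallback = v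
--     return fallback
-- ===== Notes on version B (the rewrite author's own statement) =====
-- stated objective: alternative
-- what changed: Replaced A's two sequential scans (first for an ENG value, then for any non-empty value) by a single pass that returns an ENG value immediately and carries the first non-empty value as a fallback accumulator.
import Mathlib
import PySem

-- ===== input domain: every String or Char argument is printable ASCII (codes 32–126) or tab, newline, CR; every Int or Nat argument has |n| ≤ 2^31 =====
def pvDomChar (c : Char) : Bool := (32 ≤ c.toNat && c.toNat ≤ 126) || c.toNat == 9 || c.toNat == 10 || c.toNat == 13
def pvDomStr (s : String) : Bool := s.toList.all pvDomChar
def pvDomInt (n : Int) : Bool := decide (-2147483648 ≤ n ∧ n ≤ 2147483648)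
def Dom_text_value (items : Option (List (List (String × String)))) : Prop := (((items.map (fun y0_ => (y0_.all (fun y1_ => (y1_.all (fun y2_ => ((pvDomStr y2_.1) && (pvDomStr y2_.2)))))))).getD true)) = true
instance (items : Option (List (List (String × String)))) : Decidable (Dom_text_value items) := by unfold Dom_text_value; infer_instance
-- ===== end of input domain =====

-- B replaces A's two sequential scans with one pass carrying the first non-empty value as a fallback accumulator; objective: alternative decomposition, same cost.

-- ===== PORT A =====
-- shared exact helper: Python dict.get(k) on an association list = first match
def pvDGet (item : List (String × String)) (k : String) : Option String :=
  match item with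
  | [] => none
  | (k', v) :: rest => if k' == k then some v else pvDGet rest k

-- Python truthiness of a str-or-None
def pvTruthy (o : Option String) : Bool :=
  match o with
  | some s => !(s == "")
  | none => false

-- A's first loop: return item["Value"] on the first ENG item with truthy Value
def tvLoop1 : List (List (String × String)) → Option String
  | [] => none
  | item :: rest =>
    if pvDGet item "Language" == some "ENG" && pvTruthy (pvDGet item "Value")
    then pvDGet item "Value"
    else tvLoop1 rest

-- A's second loop: return item["Value"] on the first item with truthy Value
def tvLoop2 : List (List (String × String)) → Option String
  | [] => none
  | item :: rest =>
    if pvTruthy (pvDGet item "Value")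
    then pvDGet item "Value"
    else tvLoop2 rest

def text_value (items : Option (List (List (String × String)))) : Option String :=
  match tvLoop1 (items.getD []) with
  | some v => some v
  | none => tvLoop2 (items.getD [])

-- ===== PORT B =====
-- B's single pass with a fallback accumulator
def tvScan : List (List (String × String)) → Option String → Option String
  | [], fb => fb
  | item :: rest, fb =>
    match pvDGet item "Value" with
    | some v =>
      if !(v == "") then
        if pvDGet item "Language" == some "ENG" then some v
        else tvScan rest (if fb = none then some v else fb)
      else tvScan rest fb
    | none => tvScan rest fb

def text_value_alt (items : Option (List (List (String × String)))) : Option String :=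
  tvScan (items.getD []) none

-- ===== PRECONDITION & SPEC =====
def Spec_text_value (items : Option (List (List (String × String)))) (out : Option String) : Prop := out = text_value_alt items
instance (items : Option (List (List (String × String)))) (out : Option String) : Decidable (Spec_text_value items out) := by unfold Spec_text_value; infer_instance

-- ===== CLAIM (what is proved, stated in full; the proofs are below) =====
def Claim_equal_text_value : Prop := ∀ (items : Option (List (List (String × String)))), Dom_text_value items → Spec_text_value items (text_value items)

-- ===== LEMMAS AND PROOFS =====

-- loop invariant: the single pass equals "first ENG hit, else the carried fallback, else first non-empty"
theorem tvScan_eq (xs : List (List (String × String))) :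
    ∀ fb : Option String,
      tvScan xs fb =
        match tvLoop1 xs with
        | some v => some v
        | none => match fb with
                  | some f => some f
                  | none => tvLoop2 xs := by
  induction xs with
  | nil => intro fb; cases fb <;> simp [tvScan, tvLoop1, tvLoop2]
  | cons item rest ih =>
    intro fb
    simp only [tvScan, tvLoop1, tvLoop2]
    cases hv : pvDGet item "Value" with
    | none => simp [pvTruthy, ih fb]
    | some v =>
      by_cases hve : v = ""
      · subst hve; simp [pvTruthy, ih fb]
      · have hvt : pvTruthy (some v) = true := by simp [pvTruthy, hve]
        by_cases hl : pvDGet item "Language" == some "ENG"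
        · simp [hl, hvt, hve]
        · simp only [hl, hvt, Bool.false_and]
          rw [ih (if fb = none then some v else fb)]
          cases htv : tvLoop1 rest <;> cases fb <;> simp [hve]

-- ===== VERDICT (by name: the statement is the Claim_ definition above) =====
theorem text_value_spec : Claim_equal_text_value := by
  intro items _
  unfold Spec_text_value text_value text_value_alt
  rw [tvScan_eq]
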